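-- pv_equiv track=rewrite | github.com/isk02206/python | informatics/partial-examination-term-1-december-2017-ga-hyun-choi/corkscrew.py | parasitic
-- ===== SOURCE A (Python) =====
-- def rotateRight(number):
--     '''
--     return natural number after fight rotation
--     :param number:
--     :return:
--     >>> rotateRight(179487)
--     717948
--     >>> rotateRight(52631578947368421)
--     15263157894736842
--     '''
--     str_number = str(number)  # string fixes the digits
--     lotated = str_number[-1]  # character that rotates
--     output = lotated + str_number[:-1]  # rotated number comes before all others
--     return int(output)
--
-- def parasitic(number):
--     '''
--     indicate n if the number is n-parasitic, return 0 if it is not.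
--     :param number:
--     :return:
--     >>> parasitic(179487)
--     4
--     >>> parasitic(142857)
--     5
--     >>> parasitic(105263157894736842)
--     2
--     >>> parasitic(1234)
--     0
--     '''
--     k = int(str(number)[-1])  # the last digit of the number
--     n = 0  # the default value
--     for test_n in range(1, k+1):  # n is always smaller or equal to k
--         if test_n*number == rotateRight(number):  # definition of parasitic number
--             n = test_n  # found the right n
--             break
--     return n
-- ===== SOURCE B (Python) =====
-- def rotateRight(number):
--     str_number = str(number)
--     lotated = str_number[-1]
--     output = lotated + str_number[:-1]
--     return int(output)
--
-- def parasitic(number):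
--     if number <= 0:
--         return 0
--     k = int(str(number)[-1])
--     q, r = divmod(rotateRight(number), number)
--     return q if r == 0 and 1 <= q <= k else 0
-- ===== Notes on version B (the rewrite author's own statement) =====
-- stated objective: simpler
-- what changed: Replaces A's linear search over the candidate multipliers by a single divmod: B computes the quotient and remainder of rotateRight(number) by number once and returns the quotient exactly when the remainder vanishes and the quotient lies between one and the last digit, guarding non-positive inputs up front (closed-form divisibility check instead of a loop).
-- crash fix: On negative numbers whose last digit is nonzero, A raises ValueError inside rotateRight (the rotated string has its minus sign in the middle), while B returns 0. — e.g. on parasitic(-7): A raises ValueError, B returns 0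
import Mathlib
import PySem

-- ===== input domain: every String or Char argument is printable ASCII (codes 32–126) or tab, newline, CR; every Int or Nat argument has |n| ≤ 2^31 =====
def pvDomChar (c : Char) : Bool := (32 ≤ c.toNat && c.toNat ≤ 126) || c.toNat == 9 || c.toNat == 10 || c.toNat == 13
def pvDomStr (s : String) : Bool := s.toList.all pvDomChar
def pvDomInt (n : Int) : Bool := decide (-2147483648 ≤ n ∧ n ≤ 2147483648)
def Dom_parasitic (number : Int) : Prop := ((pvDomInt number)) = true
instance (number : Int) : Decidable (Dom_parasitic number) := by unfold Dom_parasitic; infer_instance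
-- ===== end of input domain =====

-- B replaces A's search loop over test_n in 1..k by one divmod-based divisibility check (objective: simpler).

-- ===== PORT A =====
-- rotateRight: returns none exactly where Python's int(output) raises ValueError
-- (Python's one-char string s[-1] is ported as the char consed onto the remaining chars).
def rotateRight? (number : Int) : Option Int :=
  let str_number := PySem.Int.toChars number
  match PySem.List.pyGet? str_number (-1) with
  | none => none
  | some lotated => PySem.Int.ofChars? (lotated :: PySem.List.slice str_number none (some (-1)))

def parasitic (number : Int) : Int :=
  let k := ((PySem.List.pyGet? (PySem.Int.toChars number) (-1)).bind
             (fun c => PySem.Int.ofChars? [c])).getD 0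
  (PySem.List.pyRange 1 (k + 1) 1).foldl
    (fun n test_n =>
      if n ≠ 0 then n   -- the loop has already hit `break`
      else
        match rotateRight? number with
        | some r => if test_n * number = r then test_n else n
        | none => n)    -- Python raises here; such inputs are outside Pre_
    0

-- ===== PORT B =====
def parasitic_alt (number : Int) : Int :=
  if number ≤ 0 then 0
  else
    let k := ((PySem.List.pyGet? (PySem.Int.toChars number) (-1)).bind
               (fun c => PySem.Int.ofChars? [c])).getD 0
    match rotateRight? number with
    | none => 0   -- unreachable for number > 0
    | some rot =>
      match PySem.Int.divmod? rot number with
      | none => 0   -- unreachable: number ≠ 0 here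
      | some (q, r) => if r = 0 ∧ 1 ≤ q ∧ q ≤ k then q else 0

-- ===== PRECONDITION & SPEC =====
-- Pre_ excludes exactly the inputs where A raises: negative numbers with nonzero last
-- digit, on which rotateRight's int() sees the '-' in the middle and raises ValueError.
def Pre_parasitic (number : Int) : Prop := 0 ≤ number ∨ PySem.Int.mod number 10 = 0
instance (number : Int) : Decidable (Pre_parasitic number) := by unfold Pre_parasitic; infer_instance
def pvWitness_parasitic : Int := 179487

-- On negative numbers with nonzero last digit, A raises ValueError inside rotateRight; B returns 0.
def Raises_parasitic (number : Int) : Prop := number < 0 ∧ PySem.Int.mod number 10 ≠ 0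
instance (number : Int) : Decidable (Raises_parasitic number) := by unfold Raises_parasitic; infer_instance
def pvRaiseWitness_parasitic : Int := -7
def pvRaiseWitnessOut_parasitic : Int := 0

def Spec_parasitic (number : Int) (out : Int) : Prop := out = parasitic_alt number
instance (number : Int) (out : Int) : Decidable (Spec_parasitic number out) := by unfold Spec_parasitic; infer_instance

-- ===== CLAIM (what is proved, stated in full; the proofs are below) =====
def Claim_equal_parasitic : Prop := ∀ (number : Int), Dom_parasitic number → Pre_parasitic number → Spec_parasitic number (parasitic number)
def Claim_raises_parasitic : Prop := (∀ (number : Int), Dom_parasitic number → Raises_parasitic number → ¬ Pre_parasitic number) ∧ (Dom_parasitic (pvRaiseWitness_parasitic) ∧ Raises_parasitic (pvRaiseWitness_parasitic) ∧ parasitic_alt (pvRaiseWitness_parasitic) = pvRaiseWitnessOut_parasitic)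

-- ===== LEMMAS AND PROOFS =====

-- accumulator lemma for core's Nat.toDigitsCore (no such lemma exists in Mathlib)
theorem toDigitsCore_acc (b : Nat) : ∀ (f n : Nat) (ds : List Char),
    Nat.toDigitsCore b f n ds = Nat.toDigitsCore b f n [] ++ ds := by
  intro f
  induction f with
  | zero => intro n ds; simp [Nat.toDigitsCore]
  | succ f ih =>
    intro n ds
    simp only [Nat.toDigitsCore]
    by_cases h : n / b = 0
    · simp [h]
    · simp only [h, if_false]
      rw [ih (n / b) ((n % b).digitChar :: ds), ih (n / b) [(n % b).digitChar]]
      simp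

theorem getLast?_toDigits (m : Nat) :
    (Nat.toDigits 10 m).getLast? = some (Nat.digitChar (m % 10)) := by
  unfold Nat.toDigits
  simp only [Nat.toDigitsCore]
  by_cases h : m / 10 = 0
  · simp [h]
  · simp only [h, if_false]
    rw [toDigitsCore_acc 10 m (m / 10) [(m % 10).digitChar]]
    simp

-- the loop body of A, with the rotated value fixed
theorem foldl_keep (num r : Int) :
    ∀ (l : List Int) (n : Int), n ≠ 0 →
      l.foldl (fun n t => if n ≠ 0 then n else if t * num = r then t else n) n = n := by
  intro l
  induction l with
  | nil => intro n h; rfl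
  | cons x xs ih => intro n h; simp only [List.foldl_cons, if_pos h]; exact ih n h

theorem foldl_zero (num r : Int) :
    ∀ (l : List Int), (∀ t ∈ l, t * num ≠ r) →
      l.foldl (fun n t => if n ≠ 0 then n else if t * num = r then t else n) 0 = 0 := by
  intro l
  induction l with
  | nil => intro _; rfl
  | cons x xs ih =>
    intro h
    have hx : (if (0 : Int) ≠ 0 then (0 : Int) else if x * num = r then x else 0) = 0 := by
      rw [if_neg (by simp), if_neg (h x (by simp))]
    simp only [List.foldl_cons, hx]
    exact ih (fun t ht => h t (by simp [ht]))

-- the iteration that finds q sets n := q; the remaining iterations keep it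
theorem foldl_hit (num r q : Int) (hq : q ≠ 0) (hqr : q * num = r) (rest : List Int) :
    (q :: rest).foldl (fun n t => if n ≠ 0 then n else if t * num = r then t else n) 0 = q := by
  have hx : (if (0 : Int) ≠ 0 then (0 : Int) else if q * num = r then q else 0) = q := by
    rw [if_neg (by simp), if_pos hqr]
  simp only [List.foldl_cons, hx]
  exact foldl_keep num r rest q hq

-- t * num = r has at most one solution t; it is r // num, and only when r % num = 0
theorem mul_eq_iff (num r t : Int) (hnum : 0 < num) :
    t * num = r ↔ (PySem.Int.mod r num = 0 ∧ t = PySem.Int.floordiv r num) := by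
  have hmr := PySem.Int.floordiv_mul_add_mod r num
  have h0 := PySem.Int.mod_nonneg r hnum
  have h1 := PySem.Int.mod_lt r hnum
  constructor
  · intro h
    have hd : (t - PySem.Int.floordiv r num) * num = PySem.Int.mod r num := by ring_nf; linarith [hmr, h]
    have : t = PySem.Int.floordiv r num := by
      by_contra hne
      rcases lt_or_gt_of_ne hne with hlt | hgt
      · have : (t - PySem.Int.floordiv r num) * num ≤ (-1) * num :=
          mul_le_mul_of_nonneg_right (by omega) (le_of_lt hnum)
        omega
      · have : 1 * num ≤ (t - PySem.Int.floordiv r num) * num :=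
          mul_le_mul_of_nonneg_right (by omega) (le_of_lt hnum)
        omega
    refine ⟨by rw [this] at hd; simpa using hd.symm, this⟩
  · rintro ⟨hm, ht⟩
    rw [ht]; omega

-- A's loop equals B's closed-form check, for any k and rotated value r
theorem loop_eq_closed (k num r : Int) (hnum : 0 < num) :
    (PySem.List.pyRange 1 (k + 1) 1).foldl
      (fun n t => if n ≠ 0 then n else if t * num = r then t else n) 0
    = if PySem.Int.mod r num = 0 ∧ 1 ≤ PySem.Int.floordiv r num ∧ PySem.Int.floordiv r num ≤ k
      then PySem.Int.floordiv r num else 0 := by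
  set q := PySem.Int.floordiv r num with hq
  by_cases hcond : PySem.Int.mod r num = 0 ∧ 1 ≤ q ∧ q ≤ k
  · obtain ⟨hm, hq1, hqk⟩ := hcond
    rw [if_pos ⟨hm, hq1, hqk⟩]
    rw [PySem.List.pyRange_one_append 1 q (k + 1) hq1 (by omega),
        PySem.List.pyRange_one_cons (show q < k + 1 by omega)]
    rw [List.foldl_append]
    rw [foldl_zero num r _ (fun t ht => by
      rw [ne_eq, mul_eq_iff num r t hnum]
      rintro ⟨-, rfl⟩
      exact absurd (PySem.List.mem_pyRange_one.mp ht).2 (by omega))]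
    exact foldl_hit num r q (by omega) ((mul_eq_iff num r q hnum).mpr ⟨hm, rfl⟩).symm.symm _
  · rw [if_neg hcond]
    refine foldl_zero num r _ (fun t ht => ?_)
    rw [ne_eq, mul_eq_iff num r t hnum]
    rintro ⟨hm, rfl⟩
    have := PySem.List.mem_pyRange_one.mp ht
    exact hcond ⟨hm, this.1, by omega⟩

-- for negative numbers the last digit of str(number) is its last decimal digit;
-- when it is 0, A's loop range is empty
theorem k_eq_zero_of_neg (number : Int) (hneg : number < 0)
    (hmod : PySem.Int.mod number 10 = 0) :
    ((PySem.List.pyGet? (PySem.Int.toChars number) (-1)).bind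
      (fun c => PySem.Int.ofChars? [c])).getD 0 = 0 := by
  have habs : number.natAbs % 10 = 0 := by
    have : (10 : Int) ∣ number := (PySem.Int.mod_eq_zero_iff_dvd number 10).mp hmod
    omega
  have htc : PySem.Int.toChars number = '-' :: Nat.toDigits 10 number.natAbs := by
    simp [PySem.Int.toChars, hneg]
  rw [htc, PySem.List.pyGet?_neg_one]
  have hlast : (Nat.toDigits 10 number.natAbs).getLast? = some '0' := by
    rw [getLast?_toDigits, habs]; rfl
  rw [List.getLast?_cons, hlast]
  decide

theorem parasitic_spec_aux : ∀ (number : Int), Pre_parasitic number →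
    parasitic number = parasitic_alt number := by
  intro number hpre
  rcases lt_trichotomy number 0 with hneg | hzero | hpos
  · -- number < 0: Pre_ forces last digit 0, so A's loop is empty; B returns 0 at once
    have hmod : PySem.Int.mod number 10 = 0 := by
      rcases hpre with h | h
      · omega
      · exact h
    unfold parasitic parasitic_alt
    rw [if_pos (le_of_lt hneg)]
    simp only [k_eq_zero_of_neg number hneg hmod]
    rw [show (0 : Int) + 1 = 1 by ring, PySem.List.pyRange_one_eq_nil (le_refl 1)]
    rfl
  · subst hzero; decide
  · -- number > 0
    unfold parasitic parasitic_alt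
    rw [if_neg (by omega)]
    cases hr : rotateRight? number with
    | none =>
      simp only [hr]
      simp
    | some r =>
      simp only [hr]
      have hdm : PySem.Int.divmod? r number =
          some (PySem.Int.floordiv r number, PySem.Int.mod r number) := by
        simp [PySem.Int.divmod?]
        exact ⟨by omega, rfl, rfl⟩
      rw [hdm]
      exact loop_eq_closed _ number r hpos

-- ===== VERDICT (by name: the statement is the Claim_ definition above) =====
theorem parasitic_spec : Claim_equal_parasitic := by
  intro number _ hpre
  exact parasitic_spec_aux number hpre

theorem parasitic_raises : Claim_raises_parasitic := by
  unfold Claim_raises_parasitic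
  refine ⟨fun number _ hr => ?_, by decide⟩
  rcases hr with ⟨h1, h2⟩
  rintro (h | h)
  · omega
  · exact h2 h

-- self-check: B's port indeed returns the stated value at the raise witness
theorem pvRaiseWitness_parasitic_ok :
    parasitic_alt pvRaiseWitness_parasitic = pvRaiseWitnessOut_parasitic := parasitic_raises.2.2.2
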